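-- pv_equiv track=rewrite | github.com/NeliusDAO/telegram-bot-dev | rewards/airtime_rewards/rewards.py | get_network_from_prefix
-- ===== SOURCE A (Python) =====
-- from typing import List, Dict, Optional
--
-- def get_network_from_prefix(phone_number: str) -> Optional[str]:
--     """
--     Get carrier from phone number prefix (local lookup).
--
--     Args:
--         phone_number: Phone number to look up
--
--     Returns:
--         Carrier name or None if unknown
--     """
--     # Normalize number: remove spaces, dashes, +234
--     number = phone_number.replace(' ', '').replace('-', '')
--
--     if number.startswith('+234'):
--         number = '0' + number[4:]
--
--     prefix = number[:4]
--
--     networks = {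
--         'MTN': ['0803', '0806', '0703', '0706', '0813', '0816', '0810', '0814', '0903', '0906', '0913'],
--         'Airtel': ['0802', '0808', '0708', '0812', '0701', '0902', '0907', '0901'],
--         'Glo': ['0805', '0807', '0705', '0815', '0811', '0905'],
--         '9mobile': ['0809', '0817', '0818', '0909', '0908']
--     }
--
--     for network, prefixes in networks.items():
--         if prefix in prefixes:
--             return network
--
--     return None
-- ===== SOURCE B (Python) =====
-- from typing import List, Dict, Optional
--
-- # Flat (prefix, carrier) table kept sorted by prefix; lookup is a hand-written
-- # binary search instead of scanning each carrier's prefix list.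
-- _SORTED_PREFIXES = [
--     ('0701', 'Airtel'), ('0703', 'MTN'), ('0705', 'Glo'), ('0706', 'MTN'),
--     ('0708', 'Airtel'), ('0802', 'Airtel'), ('0803', 'MTN'), ('0805', 'Glo'),
--     ('0806', 'MTN'), ('0807', 'Glo'), ('0808', 'Airtel'), ('0809', '9mobile'),
--     ('0810', 'MTN'), ('0811', 'Glo'), ('0812', 'Airtel'), ('0813', 'MTN'),
--     ('0814', 'MTN'), ('0815', 'Glo'), ('0816', 'MTN'), ('0817', '9mobile'),
--     ('0818', '9mobile'), ('0901', 'Airtel'), ('0902', 'Airtel'), ('0903', 'MTN'),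
--     ('0905', 'Glo'), ('0906', 'MTN'), ('0907', 'Airtel'), ('0908', '9mobile'),
--     ('0909', '9mobile'), ('0913', 'MTN'),
-- ]
--
--
-- def get_network_from_prefix(phone_number: str) -> Optional[str]:
--     number = phone_number.replace(' ', '').replace('-', '')
--     if number.startswith('+234'):
--         number = '0' + number[4:]
--     prefix = number[:4]
--     lo, hi = 0, len(_SORTED_PREFIXES)
--     while lo < hi:
--         mid = (lo + hi) // 2
--         key, name = _SORTED_PREFIXES[mid]
--         if key == prefix:
--             return name
--         if key < prefix:
--             lo = mid + 1
--         else: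
--             hi = mid
--     return None
-- ===== Notes on version B (the rewrite author's own statement) =====
-- stated objective: alternative
-- what changed: Replaced the per-carrier loop with inner list-membership scans by a flat (prefix, carrier) table kept sorted by prefix and a hand-written binary search over it.
import Mathlib
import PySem

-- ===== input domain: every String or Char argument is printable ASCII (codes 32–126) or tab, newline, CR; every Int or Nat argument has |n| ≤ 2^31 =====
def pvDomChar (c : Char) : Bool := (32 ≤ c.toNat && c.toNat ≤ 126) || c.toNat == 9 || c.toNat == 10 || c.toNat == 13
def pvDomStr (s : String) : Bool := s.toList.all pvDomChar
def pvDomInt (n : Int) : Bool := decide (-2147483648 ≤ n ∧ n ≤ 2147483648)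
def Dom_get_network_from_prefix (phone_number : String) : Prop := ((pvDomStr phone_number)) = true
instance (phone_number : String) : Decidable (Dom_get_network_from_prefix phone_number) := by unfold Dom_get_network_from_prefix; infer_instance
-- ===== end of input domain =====

-- B replaces the per-carrier loop with inner list-membership scans by a binary search over one flat prefix-sorted (prefix, carrier) table (alternative algorithm; same normalization).

-- ===== PORT A =====
def pvNetworksA : List (String × List String) := [("MTN", ["0803", "0806", "0703", "0706", "0813", "0816", "0810", "0814", "0903", "0906", "0913"]), ("Airtel", ["0802", "0808", "0708", "0812", "0701", "0902", "0907", "0901"]), ("Glo", ["0805", "0807", "0705", "0815", "0811", "0905"]), ("9mobile", ["0809", "0817", "0818", "0909", "0908"])]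

def pvScanA : List (String × List String) → String → Option String
  | [], _ => none
  | (net, ps) :: rest, p => if ps.contains p then some net else pvScanA rest p

def get_network_from_prefix (phone_number : String) : Option String :=
  let number := PySem.Str.replace (PySem.Str.replace phone_number " " "") "-" ""
  let number := if PySem.Str.startswith number "+234" then "0" ++ PySem.Str.slice number (some 4) none else number
  let pref := PySem.Str.slice number none (some 4)
  pvScanA pvNetworksA pref

-- ===== PORT B =====
def pvSortedPrefixes : List (String × String) := [("0701", "Airtel"), ("0703", "MTN"), ("0705", "Glo"), ("0706", "MTN"), ("0708", "Airtel"), ("0802", "Airtel"), ("0803", "MTN"), ("0805", "Glo"), ("0806", "MTN"), ("0807", "Glo"), ("0808", "Airtel"), ("0809", "9mobile"), ("0810", "MTN"), ("0811", "Glo"), ("0812", "Airtel"), ("0813", "MTN"), ("0814", "MTN"), ("0815", "Glo"), ("0816", "MTN"), ("0817", "9mobile"), ("0818", "9mobile"), ("0901", "Airtel"), ("0902", "Airtel"), ("0903", "MTN"), ("0905", "Glo"), ("0906", "MTN"), ("0907", "Airtel"), ("0908", "9mobile"), ("0909", "9mobile"), ("0913", "MTN")]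

-- Python's '<' on str: lexicographic comparison by code point (exact for all chars)
def pvStrLt : List Char → List Char → Bool
  | [], [] => false
  | [], _ :: _ => true
  | _ :: _, [] => false
  | a :: as, b :: bs =>
    if a.toNat < b.toNat then true
    else if b.toNat < a.toNat then false
    else pvStrLt as bs

-- the while-loop of Source B, fuel-guarded (the interval shrinks each step, so fuel = length + 1 is never exhausted)
def pvBSearch : Nat → List (String × String) → String → Nat → Nat → Option String
  | 0, _, _, _, _ => none
  | fuel + 1, arr, p, lo, hi =>
    if lo < hi then
      match arr[(lo + hi) / 2]? with
      | none => none
      | some (key, name) =>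
        if key = p then some name
        else if pvStrLt key.toList p.toList then pvBSearch fuel arr p ((lo + hi) / 2 + 1) hi
        else pvBSearch fuel arr p lo ((lo + hi) / 2)
    else none

def get_network_from_prefix_alt (phone_number : String) : Option String :=
  let number := PySem.Str.replace (PySem.Str.replace phone_number " " "") "-" ""
  let number := if PySem.Str.startswith number "+234" then "0" ++ PySem.Str.slice number (some 4) none else number
  let pref := PySem.Str.slice number none (some 4)
  pvBSearch (pvSortedPrefixes.length + 1) pvSortedPrefixes pref 0 pvSortedPrefixes.length

-- ===== PRECONDITION & SPEC =====
def Spec_get_network_from_prefix (phone_number : String) (out : Option String) : Prop := out = get_network_from_prefix_alt phone_number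
instance (phone_number : String) (out : Option String) : Decidable (Spec_get_network_from_prefix phone_number out) := by unfold Spec_get_network_from_prefix; infer_instance

-- ===== CLAIM (what is proved, stated in full; the proofs are below) =====
def Claim_equal_get_network_from_prefix : Prop := ∀ (phone_number : String), Dom_get_network_from_prefix phone_number → Spec_get_network_from_prefix phone_number (get_network_from_prefix phone_number)

-- ===== LEMMAS AND PROOFS =====
-- first-match lookup in a flat association list
def pvLookupFirst : List (String × String) → String → Option String
  | [], _ => none
  | (k, v) :: rest, p => if k == p then some v else pvLookupFirst rest p

-- flatten the grouped table into (prefix, network) pairs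
def pvFlatten (t : List (String × List String)) : List (String × String) :=
  t.flatMap (fun nps => nps.2.map (fun q => (q, nps.1)))

theorem pvLookupFirst_append_map (ps : List String) (net : String) (l : List (String × String)) (p : String) :
    pvLookupFirst (ps.map (fun q => (q, net)) ++ l) p
      = if ps.contains p then some net else pvLookupFirst l p := by
  induction ps with
  | nil => simp
  | cons q ps ih =>
      by_cases h : q = p
      · subst h; simp [pvLookupFirst]
      · simp [pvLookupFirst, h, Ne.symm h, ih]

theorem pvScanA_eq_lookupFirst (t : List (String × List String)) (p : String) :
    pvScanA t p = pvLookupFirst (pvFlatten t) p := by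
  induction t with
  | nil => simp [pvScanA, pvFlatten, pvLookupFirst]
  | cons nps rest ih =>
      obtain ⟨net, ps⟩ := nps
      simp [pvScanA, pvFlatten, List.flatMap_cons, pvLookupFirst_append_map, ih]

-- binary search succeeds only by probing an entry whose key is the query
theorem pvBSearch_some_mem (fuel : Nat) (arr : List (String × String)) (p : String) (lo hi : Nat) (v : String) :
    pvBSearch fuel arr p lo hi = some v → (p, v) ∈ arr := by
  induction fuel generalizing lo hi with
  | zero => intro h; simp [pvBSearch] at h
  | succ fuel ih =>
      intro h
      unfold pvBSearch at h
      split at h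
      · cases hg : arr[(lo + hi) / 2]? with
        | none => rw [hg] at h; simp at h
        | some kv =>
            obtain ⟨k, name⟩ := kv
            rw [hg] at h
            simp only at h
            split at h
            · rename_i hk
              cases h
              subst hk
              exact List.mem_of_getElem? hg
            · split at h
              · exact ih _ _ h
              · exact ih _ _ h
      · simp at h

-- a successful first-match lookup exhibits a member
theorem pvLookupFirst_some_mem (l : List (String × String)) (p v : String) :
    pvLookupFirst l p = some v → (p, v) ∈ l := by
  induction l with
  | nil => intro h; simp [pvLookupFirst] at h
  | cons kv rest ih =>
      obtain ⟨k, w⟩ := kv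
      intro h
      by_cases hk : k = p
      · subst hk
        simp only [pvLookupFirst, beq_self_eq_true, if_true, Option.some.injEq] at h
        subst h; exact List.mem_cons_self
      · simp only [pvLookupFirst, beq_iff_eq, hk, if_false] at h
        exact List.mem_cons_of_mem _ (ih h)

-- core: the grouped scan and the binary search agree on every query string
theorem pvLookup_eq (p : String) :
    pvScanA pvNetworksA p = pvBSearch (pvSortedPrefixes.length + 1) pvSortedPrefixes p 0 pvSortedPrefixes.length := by
  rw [pvScanA_eq_lookupFirst]
  cases hA : pvLookupFirst (pvFlatten pvNetworksA) p with
  | none =>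
      cases hB : pvBSearch (pvSortedPrefixes.length + 1) pvSortedPrefixes p 0 pvSortedPrefixes.length with
      | none => rfl
      | some v =>
          exfalso
          have hm := pvBSearch_some_mem _ _ _ _ _ _ hB
          -- p is one of the 30 literal prefixes; flat lookup at each of them is not none
          fin_cases hm <;> exact absurd hA (by decide)
  | some v =>
      have hm := pvLookupFirst_some_mem _ _ _ hA
      fin_cases hm <;> decide

-- ===== VERDICT (by name: the statement is the Claim_ definition above) =====
theorem get_network_from_prefix_spec : Claim_equal_get_network_from_prefix := by
  intro s _
  unfold Spec_get_network_from_prefix get_network_from_prefix get_network_from_prefix_alt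
  exact pvLookup_eq _
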